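-- pv_equiv track=rewrite | github.com/Rthe3rd/algos_and_data_structures | arrays_and_hashing/kth_frequency.py | kth_frequency
-- ===== SOURCE A (Python) =====
-- def kth_frequency(input_array, k=2):
--     frequency_hash = {}
--     for element in input_array:
--         if element in frequency_hash:
--             frequency_hash[element] += 1
--         else:
--             frequency_hash[element] = 1
--     holder = [[]] * len(input_array)
--     # for key, value in frequency_hash.items():
--     #     if holder[value] == []:
--     #         holder[value] = key
--     #     else:
--     #         holder[value] = [holder[value], key]
--     # sorted([(item[1], item[0]) for item in dict_1.items()])
--     sorted_frequencies = sorted([(item[0], item[1]) for item in frequency_hash.items()], reverse=False)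
--     kth_elements = []
--     for i in range(k):
--         kth_elements.append(sorted_frequencies[i][0])
--     # for index in range(len(holder) - 1, 0, -1):
--     #     if holder[index]:
--     #         kth_elements.append(holder[index])
--
--     return kth_elements
-- ===== SOURCE B (Python) =====
-- def kth_frequency(input_array, k=2):
--     # dedup via set, quickselect the k-th smallest distinct value (median-of-3 pivot),
--     # then sort only the k survivors
--     if k <= 0:
--         return []
--     vals = list(set(input_array))
--     if k >= len(vals):
--         return sorted(vals)
--     xs = vals
--     j = k
--     while True:
--         a, b, c = xs[0], xs[len(xs) // 2], xs[-1]
--         p = a + b + c - min(a, b, c) - max(a, b, c)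
--         lt = [v for v in xs if v < p]
--         if j <= len(lt):
--             xs = lt
--         elif j == len(lt) + 1:
--             t = p
--             break
--         else:
--             j -= len(lt) + 1
--             xs = [v for v in xs if v > p]
--     return sorted(v for v in vals if v <= t)
-- ===== Notes on version B (the rewrite author's own statement) =====
-- stated objective: alternative
-- what changed: A counts every element into a dict, sorts all (value,count) pairs and indexes out the first k; B dedups via a set, quickselects the k-th smallest distinct value with a median-of-three pivot and sorts only the k survivors, never sorting all distinct values.
-- crash fix: When k exceeds the number of distinct elements A raises IndexError; B returns all distinct elements in ascending order. — e.g. on kth_frequency([1, 1], 2): A raises IndexError, B returns [1]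
import Mathlib
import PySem

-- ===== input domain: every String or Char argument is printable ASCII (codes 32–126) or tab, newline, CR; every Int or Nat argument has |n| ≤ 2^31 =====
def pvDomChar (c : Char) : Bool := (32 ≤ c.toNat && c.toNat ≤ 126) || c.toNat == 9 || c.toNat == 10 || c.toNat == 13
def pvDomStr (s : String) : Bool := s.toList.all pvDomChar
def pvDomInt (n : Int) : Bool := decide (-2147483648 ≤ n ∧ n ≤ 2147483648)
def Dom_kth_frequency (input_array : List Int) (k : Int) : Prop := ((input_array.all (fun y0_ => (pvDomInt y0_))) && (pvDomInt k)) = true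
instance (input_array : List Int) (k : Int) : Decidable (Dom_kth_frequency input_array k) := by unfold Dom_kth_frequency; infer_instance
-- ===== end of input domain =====

-- B replaces A's full sort of the (value, count) pairs by set dedup + quickselect of the
-- k-th smallest distinct value + a sort of only the k survivors (objective: alternative).

-- ===== PORT A =====
def kth_frequency (input_array : List Int) (k : Int) : List Int :=
  let frequency_hash := input_array.foldl
    (fun d element =>
      if d.contains element then d.insert element (d.getD element 0 + 1)
      else d.insert element 1) (PySem.Dict.empty : PySem.Dict Int Int)
  let _holder := PySem.List.pyRepeat [([] : List Int)] (PySem.List.len input_array)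
  let sorted_frequencies := PySem.List.sorted2
    (frequency_hash.items.map (fun item => (item.1, item.2))) (fun t => t.1) (fun t => t.2)
  (PySem.List.pyRange 0 k 1).foldl
    (fun kth_elements i =>
      kth_elements ++ [(PySem.List.pyGetD sorted_frequencies i (0, 0)).1]) []

-- ===== PORT B =====
-- hand port of Source B's quickselect while-loop (exact: j stays an int, '//' is floordiv,
-- xs[0] / xs[len(xs)//2] / xs[-1] are read with pyGetD and are in range whenever xs is
-- nonempty); the fuel argument only bounds the iteration count: xs strictly shrinks every
-- pass, so fuel = len(xs) at the call site makes the recursion structural without changing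
-- any computed value. Source B iterates over a Python set only to compute the k-th smallest
-- distinct value and a sorted filtered list, both independent of the set's iteration order.
def qselLoop : Nat → List Int → Int → Int
  | 0, _, _ => 0
  | fuel + 1, xs, j =>
    let a := PySem.List.pyGetD xs 0 0
    let b := PySem.List.pyGetD xs (PySem.Int.floordiv (PySem.List.len xs) 2) 0
    let c := PySem.List.pyGetD xs (-1) 0
    let p := a + b + c - min a (min b c) - max a (max b c)
    let lt := xs.filter (fun v => decide (v < p))
    if j ≤ PySem.List.len lt then qselLoop fuel lt j
    else if j = PySem.List.len lt + 1 then p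
    else qselLoop fuel (xs.filter (fun v => decide (p < v))) (j - (PySem.List.len lt + 1))

def kth_frequency_alt (input_array : List Int) (k : Int) : List Int :=
  if k ≤ 0 then []
  else
    let vals := PySem.Set.ofList input_array
    if PySem.List.len vals ≤ k then PySem.List.sorted vals (fun v => v)
    else
      let t := qselLoop vals.length vals k
      PySem.List.sorted (vals.filter (fun v => decide (v ≤ t))) (fun v => v)

-- ===== PRECONDITION & SPEC =====
-- Pre_ excludes exactly the inputs where A raises IndexError: k larger than the number of
-- distinct elements of input_array (sorted_frequencies[i] goes out of range).
def Pre_kth_frequency (input_array : List Int) (k : Int) : Prop :=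
  k ≤ ((PySem.Set.ofList input_array).length : Int)
instance (input_array : List Int) (k : Int) : Decidable (Pre_kth_frequency input_array k) := by
  unfold Pre_kth_frequency; infer_instance
def pvWitness_kth_frequency : List Int × Int := ([3, 1, 2, 1], 2)

-- A raises IndexError whenever k exceeds the number of distinct elements; B returns all
-- distinct elements in ascending order there.
def Raises_kth_frequency (input_array : List Int) (k : Int) : Prop :=
  ((PySem.Set.ofList input_array).length : Int) < k
instance (input_array : List Int) (k : Int) : Decidable (Raises_kth_frequency input_array k) := by
  unfold Raises_kth_frequency; infer_instance
def pvRaiseWitness_kth_frequency : List Int × Int := ([1, 1], 2)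
def pvRaiseWitnessOut_kth_frequency : List Int := [1]

def Spec_kth_frequency (input_array : List Int) (k : Int) (out : List Int) : Prop :=
  out = kth_frequency_alt input_array k
instance (input_array : List Int) (k : Int) (out : List Int) : Decidable (Spec_kth_frequency input_array k out) := by
  unfold Spec_kth_frequency; infer_instance

-- ===== CLAIM (what is proved, stated in full; the proofs are below) =====
def Claim_equal_kth_frequency : Prop := ∀ (input_array : List Int) (k : Int), Dom_kth_frequency input_array k → Pre_kth_frequency input_array k → Spec_kth_frequency input_array k (kth_frequency input_array k)

def Claim_raises_kth_frequency : Prop := (∀ (input_array : List Int) (k : Int), Dom_kth_frequency input_array k → Raises_kth_frequency input_array k → ¬ Pre_kth_frequency input_array k) ∧ (Dom_kth_frequency (pvRaiseWitness_kth_frequency.1) (pvRaiseWitness_kth_frequency.2) ∧ Raises_kth_frequency (pvRaiseWitness_kth_frequency.1) (pvRaiseWitness_kth_frequency.2) ∧ kth_frequency_alt (pvRaiseWitness_kth_frequency.1) (pvRaiseWitness_kth_frequency.2) = pvRaiseWitnessOut_kth_frequency)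

-- ===== LEMMAS AND PROOFS =====

lemma sorted_pairwise_lt (S : List Int) (hS : S.Nodup) :
    (PySem.List.sorted S (fun y => y)).Pairwise (· < ·) := by
  have h1 : (PySem.List.sorted S (fun y => y)).Pairwise (· ≤ ·) :=
    PySem.List.sorted_pairwise S (fun y => y)
  have h2 : (PySem.List.sorted S (fun y => y)).Nodup :=
    (PySem.List.sorted_perm S (fun y => y) false).nodup_iff.mpr hS
  exact (h1.and h2).imp (fun h => lt_of_le_of_ne h.1 h.2)

lemma med3_mem (a b c : Int) :
    a + b + c - min a (min b c) - max a (max b c) = a ∨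
    a + b + c - min a (min b c) - max a (max b c) = b ∨
    a + b + c - min a (min b c) - max a (max b c) = c := by
  omega

lemma part_sorted (xs : List Int) (p : Int) (hnd : xs.Nodup) (hp : p ∈ xs) :
    PySem.List.sorted xs (fun v => v)
      = PySem.List.sorted (xs.filter (fun v => decide (v < p))) (fun v => v)
        ++ p :: PySem.List.sorted (xs.filter (fun v => decide (p < v))) (fun v => v) := by
  set lt := xs.filter (fun v => decide (v < p)) with hlt
  set gt := xs.filter (fun v => decide (p < v)) with hgt
  have hltnd : lt.Nodup := hnd.filter _
  have hgtnd : gt.Nodup := hnd.filter _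
  apply PySem.List.sorted_eq_of_perm_of_pairwise_lt
  · -- perm
    have h1 : (PySem.List.sorted lt (fun v => v) ++ p :: PySem.List.sorted gt (fun v => v)).Perm
        (lt ++ p :: gt) :=
      (PySem.List.sorted_perm lt (fun v => v) false).append
        ((PySem.List.sorted_perm gt (fun v => v) false).cons p)
    refine h1.trans ?_
    have hnd2 : (lt ++ p :: gt).Nodup := by
      rw [List.nodup_append]
      refine ⟨hltnd, ?_, ?_⟩
      · rw [List.nodup_cons]
        refine ⟨?_, hgtnd⟩
        intro hmem
        have := (List.mem_filter.mp hmem).2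
        simp at this
      · intro u hu w hw
        have hu2 := (List.mem_filter.mp hu).2
        simp only [decide_eq_true_eq] at hu2
        rcases List.mem_cons.mp hw with rfl | hw2
        · omega
        · have := (List.mem_filter.mp hw2).2
          simp only [decide_eq_true_eq] at this
          omega
    rw [List.perm_ext_iff_of_nodup hnd2 hnd]
    intro v
    constructor
    · intro hv
      rcases List.mem_append.mp hv with h | h
      · exact (List.mem_filter.mp h).1
      · rcases List.mem_cons.mp h with rfl | h2
        · exact hp
        · exact (List.mem_filter.mp h2).1
    · intro hv
      rcases lt_trichotomy v p with h | h | h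
      · exact List.mem_append.mpr (Or.inl (List.mem_filter.mpr ⟨hv, by simpa using h⟩))
      · exact List.mem_append.mpr (Or.inr (List.mem_cons.mpr (Or.inl h)))
      · exact List.mem_append.mpr (Or.inr (List.mem_cons.mpr
          (Or.inr (List.mem_filter.mpr ⟨hv, by simpa using h⟩))))
  · -- pairwise <
    rw [List.pairwise_append]
    refine ⟨sorted_pairwise_lt lt hltnd, ?_, ?_⟩
    · rw [List.pairwise_cons]
      refine ⟨?_, sorted_pairwise_lt gt hgtnd⟩
      intro w hw
      have := (List.mem_filter.mp ((PySem.List.mem_sorted gt (fun v => v) false w).mp hw)).2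
      simpa using this
    · intro u hu w hw
      have hu2 := (List.mem_filter.mp ((PySem.List.mem_sorted lt (fun v => v) false u).mp hu)).2
      simp only [decide_eq_true_eq] at hu2
      rcases List.mem_cons.mp hw with rfl | hw2
      · exact hu2
      · have := (List.mem_filter.mp ((PySem.List.mem_sorted gt (fun v => v) false w).mp hw2)).2
        simp only [decide_eq_true_eq] at this
        omega

lemma qsel_spec : ∀ (fuel : Nat) (xs : List Int) (j : Int), xs.Nodup → xs.length ≤ fuel →
    1 ≤ j → j ≤ (xs.length : Int) →
    qselLoop fuel xs j = (PySem.List.sorted xs (fun v => v)).getD (j - 1).toNat 0 := by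
  intro fuel
  induction fuel with
  | zero =>
    intro xs j _ hlen h1 h2
    have : xs = [] := List.eq_nil_of_length_eq_zero (by omega)
    subst this
    simp at h2
    omega
  | succ fuel ih =>
    intro xs j hnd hlen h1 h2
    have hxlen : 0 < xs.length := by
      by_contra h
      have : xs.length = 0 := by omega
      rw [this] at h2
      simp at h2
      omega
    have hne : xs ≠ [] := List.ne_nil_of_length_pos hxlen
    have ha : PySem.List.pyGetD xs 0 0 ∈ xs := by
      rw [PySem.List.pyGetD_zero, List.getD_eq_getElem xs 0 hxlen]
      exact List.getElem_mem _
    have hmidnn : (0 : Int) ≤ PySem.Int.floordiv (PySem.List.len xs) 2 := by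
      rw [PySem.List.len_eq]
      exact (PySem.Int.le_floordiv_iff_mul_le (by norm_num)).mpr (by omega)
    have hmidlt : PySem.Int.floordiv (PySem.List.len xs) 2 < (xs.length : Int) := by
      rw [PySem.List.len_eq]
      exact (PySem.Int.floordiv_lt_iff_lt_mul (by norm_num)).mpr (by omega)
    have hb : PySem.List.pyGetD xs (PySem.Int.floordiv (PySem.List.len xs) 2) 0 ∈ xs := by
      rw [PySem.List.pyGetD_of_nonneg xs 0 hmidnn,
        List.getD_eq_getElem xs 0 (by omega)]
      exact List.getElem_mem _
    have hcm : PySem.List.pyGetD xs (-1) 0 ∈ xs := by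
      rw [PySem.List.pyGetD_neg_one xs 0 hne]
      exact List.getLast_mem hne
    obtain ⟨av, hav⟩ : ∃ v, v = PySem.List.pyGetD xs 0 0 := ⟨_, rfl⟩
    obtain ⟨bv, hbv⟩ : ∃ v, v = PySem.List.pyGetD xs (PySem.Int.floordiv (PySem.List.len xs) 2) 0 :=
      ⟨_, rfl⟩
    obtain ⟨cv, hcv⟩ : ∃ v, v = PySem.List.pyGetD xs (-1) 0 := ⟨_, rfl⟩
    obtain ⟨p, hpdef⟩ : ∃ v, v = av + bv + cv - min av (min bv cv) - max av (max bv cv) :=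
      ⟨_, rfl⟩
    obtain ⟨ltl, hltl⟩ : ∃ l, l = xs.filter (fun v => decide (v < p)) := ⟨_, rfl⟩
    obtain ⟨gtl, hgtl⟩ : ∃ l, l = xs.filter (fun v => decide (p < v)) := ⟨_, rfl⟩
    have hstep : qselLoop (fuel + 1) xs j
        = (if j ≤ PySem.List.len ltl then qselLoop fuel ltl j
           else if j = PySem.List.len ltl + 1 then p
           else qselLoop fuel gtl (j - (PySem.List.len ltl + 1))) := by
      rw [hltl, hgtl, hpdef, hav, hbv, hcv, qselLoop]
    rw [hstep]
    have hp : p ∈ xs := by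
      rcases med3_mem av bv cv with h | h | h
      · rw [hpdef, h, hav]; exact ha
      · rw [hpdef, h, hbv]; exact hb
      · rw [hpdef, h, hcv]; exact hcm
    have hpart := part_sorted xs p hnd hp
    rw [← hltl, ← hgtl] at hpart
    have hsum : xs.length = ltl.length + 1 + gtl.length := by
      have hlens := congrArg List.length hpart
      rw [PySem.List.length_sorted] at hlens
      simp only [List.length_append, List.length_cons, PySem.List.length_sorted] at hlens
      omega
    have hltnd : ltl.Nodup := by rw [hltl]; exact hnd.filter _
    have hgtnd : gtl.Nodup := by rw [hgtl]; exact hnd.filter _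
    by_cases hc1 : j ≤ PySem.List.len ltl
    · rw [if_pos hc1]
      rw [PySem.List.len_eq] at hc1
      rw [ih ltl j hltnd (by omega) h1 hc1, hpart,
        List.getD_append _ _ _ _ (by rw [PySem.List.length_sorted]; omega)]
    · rw [if_neg hc1]
      rw [PySem.List.len_eq] at hc1
      by_cases hc2 : j = (ltl.length : Int) + 1
      · rw [if_pos (by rw [PySem.List.len_eq]; exact hc2)]
        rw [hpart, List.getD_append_right _ _ _ _ (by rw [PySem.List.length_sorted]; omega)]
        have hidx : (j - 1).toNat - (PySem.List.sorted ltl (fun v => v)).length = 0 := by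
          rw [PySem.List.length_sorted]; omega
        rw [hidx, List.getD_cons_zero]
      · rw [if_neg (by rw [PySem.List.len_eq]; exact hc2)]
        have hj2 : (ltl.length : Int) + 1 < j := by omega
        rw [ih gtl (j - ((PySem.List.len ltl) + 1)) hgtnd (by omega)
          (by rw [PySem.List.len_eq]; omega) (by rw [PySem.List.len_eq]; push_cast; omega)]
        rw [hpart, List.getD_append_right _ _ _ _ (by rw [PySem.List.length_sorted]; omega)]
        have hidx : (j - 1).toNat - (PySem.List.sorted ltl (fun v => v)).length
            = ((j - (PySem.List.len ltl + 1)) - 1).toNat + 1 := by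
          rw [PySem.List.length_sorted, PySem.List.len_eq]
          omega
        rw [hidx, List.getD_cons_succ]

lemma filter_le_take (S : List Int) (hnd : S.Nodup) (kn : Nat) (hk1 : 1 ≤ kn)
    (hkm : kn ≤ S.length) :
    PySem.List.sorted
      (S.filter (fun v => decide (v ≤ (PySem.List.sorted S (fun y => y)).getD (kn - 1) 0)))
      (fun v => v)
    = (PySem.List.sorted S (fun y => y)).take kn := by
  set l0 := PySem.List.sorted S (fun y => y) with hl0
  have hlen : l0.length = S.length := PySem.List.length_sorted S _ false
  have hl0nd : l0.Nodup := (PySem.List.sorted_perm S (fun y => y) false).nodup_iff.mpr hnd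
  have hl0lt : l0.Pairwise (· < ·) := sorted_pairwise_lt S hnd
  set t := l0.getD (kn - 1) 0 with ht
  apply PySem.List.sorted_eq_of_perm_of_pairwise_lt
  · -- (take kn l0).Perm (filter ...)
    rw [List.perm_ext_iff_of_nodup (hl0nd.sublist (List.take_sublist ..)) (hnd.filter _)]
    intro v
    rw [List.mem_filter]
    constructor
    · intro hv
      obtain ⟨i, hi, rfl⟩ := List.getElem_of_mem hv
      have hi' : i < kn := by
        have := hi; rw [List.length_take] at this; omega
      rw [List.getElem_take]
      refine ⟨(PySem.List.mem_sorted S (fun y => y) false _).mp (List.getElem_mem _), ?_⟩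
      have hmono : l0[i] ≤ l0[kn - 1] := by
        rcases eq_or_lt_of_le (by omega : i ≤ kn - 1) with h | h
        · simp [h]
        · exact (List.pairwise_iff_getElem.mp hl0lt i (kn - 1) (by omega) (by omega) h).le
      have hgd : t = l0[kn - 1] := by
        rw [ht, List.getD_eq_getElem l0 0 (by omega)]
      simpa [hgd] using hmono
    · rintro ⟨hvS, hvt⟩
      simp only [decide_eq_true_eq] at hvt
      have hvl0 : v ∈ l0 := (PySem.List.mem_sorted S (fun y => y) false v).mpr hvS
      obtain ⟨i, hi, rfl⟩ := List.getElem_of_mem hvl0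
      have hgd : t = l0[kn - 1] := by
        rw [ht, List.getD_eq_getElem l0 0 (by omega)]
      have hik : i < kn := by
        by_contra hge
        have : l0[kn - 1] < l0[i] :=
          List.pairwise_iff_getElem.mp hl0lt (kn - 1) i (by omega) (by omega) (by omega)
        rw [← hgd] at this
        omega
      have : (l0.take kn)[i]'(by rw [List.length_take]; omega) = l0[i] := List.getElem_take
      exact this ▸ List.getElem_mem _
  · exact hl0lt.sublist (List.take_sublist ..)

lemma alt_eq_take (input_array : List Int) (k : Int) :
    kth_frequency_alt input_array k
      = (PySem.List.sorted (PySem.Set.ofList input_array) (fun y => y)).take k.toNat := by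
  have hnd : (PySem.Set.ofList input_array).Nodup := PySem.Set.nodup_ofList input_array
  unfold kth_frequency_alt
  by_cases h : k ≤ 0
  · rw [if_pos h]
    have h0 : k.toNat = 0 := by omega
    simp [h0]
  · rw [if_neg h]
    have hk : 0 < k := by omega
    by_cases hle : PySem.List.len (PySem.Set.ofList input_array) ≤ k
    · rw [if_pos hle]
      rw [PySem.List.len_eq] at hle
      exact (List.take_of_length_le (by rw [PySem.List.length_sorted]; omega)).symm
    · rw [if_neg hle]
      rw [PySem.List.len_eq, not_le] at hle
      have hts := qsel_spec (PySem.Set.ofList input_array).length (PySem.Set.ofList input_array)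
        k hnd (le_refl _) (by omega) (by omega)
      rw [hts]
      have hkn : (k - 1).toNat = k.toNat - 1 := by omega
      rw [hkn]
      exact filter_le_take (PySem.Set.ofList input_array) hnd k.toNat (by omega) (by omega)

lemma counter_fold (input_array : List Int) :
    input_array.foldl
      (fun d element =>
        if d.contains element then d.insert element (d.getD element 0 + 1)
        else d.insert element 1) (PySem.Dict.empty : PySem.Dict Int Int)
    = PySem.Dict.counter input_array := by
  rw [PySem.List.foldl_congr_mem input_array _ (fun d x => d.insert x (d.getD x 0 + 1))
    PySem.Dict.empty ?_]
  · exact PySem.Dict.foldl_insert_getD_add_one_eq_counter input_array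
  · intro d x _
    by_cases hc : d.contains x
    · simp [hc]
    · have h0 : d.getD x 0 = 0 :=
        PySem.Dict.getD_of_not_contains d 0 (by simpa using hc)
      simp [hc, h0]

lemma lex_fst (f : Int → Int) (a b : Int) :
    (decide (a < b) || !decide (b < a) && decide (f a < f b)) = decide (a < b) := by
  rcases lt_trichotomy a b with h | h | h
  · simp [h]
  · subst h; simp
  · simp [h, not_lt.mpr h.le]

lemma insertBy_map (f : Int → Int) (x : Int) : ∀ (l : List Int),
    PySem.List.insertBy
      (fun a b => decide (a.1 < b.1) || !decide (b.1 < a.1) && decide (a.2 < b.2))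
      (x, f x) (l.map (fun a => (a, f a)))
    = (PySem.List.insertBy (fun a b => decide (a < b)) x l).map (fun a => (a, f a)) := by
  intro l
  induction l with
  | nil => simp [PySem.List.insertBy]
  | cons y t ih =>
    simp only [List.map_cons, PySem.List.insertBy]
    rw [lex_fst f x y]
    split
    · simp
    · simp [ih]

lemma foldl_insertBy_map (f : Int → Int) : ∀ (l acc : List Int),
    (l.map (fun a => (a, f a))).foldl
      (fun acc x => PySem.List.insertBy
        (fun a b => decide (a.1 < b.1) || !decide (b.1 < a.1) && decide (a.2 < b.2)) x acc)
      (acc.map (fun a => (a, f a)))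
    = (l.foldl (fun acc x => PySem.List.insertBy (fun a b => decide (a < b)) x acc) acc).map
        (fun a => (a, f a)) := by
  intro l
  induction l with
  | nil => intro acc; simp
  | cons y t ih =>
    intro acc
    rw [List.map_cons, List.foldl_cons, List.foldl_cons, insertBy_map f y acc,
      ih (PySem.List.insertBy (fun a b => decide (a < b)) y acc)]

lemma sorted2_map_fst (keys : List Int) (f : Int → Int) :
    PySem.List.sorted2 (keys.map (fun a => (a, f a))) (fun t => t.1) (fun t => t.2)
      = (PySem.List.sorted keys (fun y => y)).map (fun a => (a, f a)) := by
  rw [PySem.List.sorted_eq_foldl_insertBy]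
  have := foldl_insertBy_map f keys []
  simpa [PySem.List.sorted2] using this

lemma range_map_getD_eq_take (l : List Int) (d : Int) (n : Nat) (h : n ≤ l.length) :
    (List.range n).map (fun j => l.getD j d) = l.take n := by
  apply List.ext_getElem
  · simp; omega
  · intro i h1 h2
    simp only [List.getElem_map, List.getElem_range, List.getElem_take]
    rw [List.getD_eq_getElem]


lemma a_eq_take (input_array : List Int) (k : Int) (hpre : Pre_kth_frequency input_array k) :
    kth_frequency input_array k
      = (PySem.List.sorted (PySem.Set.ofList input_array) (fun y => y)).take k.toNat := by
  unfold Pre_kth_frequency at hpre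
  unfold kth_frequency
  simp only [counter_fold, PySem.Dict.items_counter, List.map_map]
  have hcomp : ((fun item : Int × Int => (item.1, item.2))
        ∘ fun a => (a, (List.count a input_array : Int)))
      = fun a => (a, (List.count a input_array : Int)) := rfl
  rw [hcomp, sorted2_map_fst, PySem.List.foldl_append_singleton_eq_map, List.nil_append]
  by_cases hk : k ≤ 0
  · rw [PySem.List.pyRange_one_eq_nil hk]
    have h0 : k.toNat = 0 := by omega
    simp [h0]
  · have hk' : 0 < k := by omega
    rw [PySem.List.pyRange_one]
    simp only [List.map_map, sub_zero]
    have hm : (PySem.List.sorted (PySem.Set.ofList input_array) (fun y => y)).length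
        = (PySem.Set.ofList input_array).length := PySem.List.length_sorted _ _ _
    have hkm : k.toNat ≤ (PySem.Set.ofList input_array).length := by omega
    rw [List.map_congr_left
      (g := fun j : Nat =>
        (PySem.List.sorted (PySem.Set.ofList input_array) (fun y => y)).getD j 0) ?_]
    · exact range_map_getD_eq_take _ 0 _ (by omega)
    · intro j hj
      have hj' : j < k.toNat := List.mem_range.mp hj
      simp only [Function.comp_apply, zero_add, PySem.List.pyGetD_natCast]
      have hjL : j < ((PySem.List.sorted (PySem.Set.ofList input_array) (fun y => y)).map
          (fun a => (a, (List.count a input_array : Int)))).length := by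
        rw [List.length_map, hm]; omega
      rw [List.getD_eq_getElem _ _ hjL, List.getElem_map,
        List.getD_eq_getElem _ _ (by omega)]

-- ===== VERDICT (by name: the statement is the Claim_ definition above) =====
theorem kth_frequency_spec : Claim_equal_kth_frequency := by
  intro input_array k _ hpre
  unfold Spec_kth_frequency
  rw [a_eq_take input_array k hpre, alt_eq_take]

@[simp]
theorem kth_frequency_raises : Claim_raises_kth_frequency := by
  unfold Claim_raises_kth_frequency
  refine ⟨fun ia k _ hr hp => ?_, by decide⟩
  unfold Raises_kth_frequency at hr
  unfold Pre_kth_frequency at hp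
  omega
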